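-- pv_equiv track=rewrite | github.com/pro-long/internship-tasks-p.ai | task1/main.py | find_price_gap_pair
-- ===== SOURCE A (Python) =====
-- def find_price_gap_pair(nums: list[int], k: int) -> tuple[int, int] | None:
--     """
--         Approach:
--             1. Create a dictionary to map each value to its list of indices.
--             2. Iterate through the list and for each value, calculate the target value (value - k or value + k).
--             3. Check if the target value exists in the dictionary.
--             4. If it exists, iterate through the list of indices for that target value and form pairs.
--             5. Store unique pairs in a set to avoid duplicates.
--             6. Finally, return the lexicographically smallest pair or None if no such pair exists.
--
--         Time Complexity: O(n^2) in the worst case due to nested loops.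
--         Space Complexity: O(n) for the dictionary and set.
--     """
--     ans = set()
--     value_to_index = {}
--
--     for index, value in enumerate(nums):
--         if value not in value_to_index:
--             value_to_index[value] = []
--         value_to_index[value].append(index)
--
--     for index, value in enumerate(nums):
--         if value<0: diff = value+k
--         else: diff = value-k
--
--         if diff in value_to_index:
--             for index_diff in value_to_index[diff]:
--                 if index != index_diff:
--                     pair = tuple(sorted([index, index_diff]))
--                     ans.add(pair)
--
--     if not ans:
--         return None
--
--     ans = sorted(list(ans))
--     return ans[0]
-- ===== SOURCE B (Python) =====
-- def find_price_gap_pair(nums: list[int], k: int) -> tuple[int, int] | None: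
--     """Ordered search with early exit: scan index pairs (i, j), i < j, in
--     lexicographic order and return the first matching pair directly — no
--     dictionary, no pair set, no sort."""
--     n = len(nums)
--
--     def target(v):
--         return v + k if v < 0 else v - k
--
--     for i in range(n):
--         ti = nums[i]
--         for j in range(i + 1, n):
--             if target(ti) == nums[j] or target(nums[j]) == ti:
--                 return (i, j)
--     return None
-- ===== Notes on version B (the rewrite author's own statement) =====
-- stated objective: alternative
-- what changed: B drops A's value-to-indices dictionary, pair set and final sort, and instead scans index pairs (i, j) with i < j in lexicographic order, returning the first matching pair directly (early exit).
import Mathlib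
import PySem

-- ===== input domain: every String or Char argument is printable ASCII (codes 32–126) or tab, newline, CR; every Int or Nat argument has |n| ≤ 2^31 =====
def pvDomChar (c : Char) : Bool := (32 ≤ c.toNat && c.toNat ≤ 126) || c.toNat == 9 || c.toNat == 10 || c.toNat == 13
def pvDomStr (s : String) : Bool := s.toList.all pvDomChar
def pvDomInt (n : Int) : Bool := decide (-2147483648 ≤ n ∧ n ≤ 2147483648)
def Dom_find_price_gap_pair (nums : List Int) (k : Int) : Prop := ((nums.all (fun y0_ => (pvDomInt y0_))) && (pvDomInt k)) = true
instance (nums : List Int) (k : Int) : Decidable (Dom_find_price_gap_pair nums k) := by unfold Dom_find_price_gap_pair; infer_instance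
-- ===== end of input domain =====

-- B replaces A's dict-of-indices + set-of-pairs + sort by a direct ordered scan of the index
-- pairs (i, j), i < j, returning the first (= lexicographically smallest) matching pair.

-- ===== PORT A =====

-- pair = tuple(sorted([index, index_diff]))  (a 2-element list sorts to a 2-tuple)
def pvSpair (x y : Int) : Int × Int :=
  match PySem.List.sorted [x, y] (fun a => a) false with
  | [a, b] => (a, b)
  | _ => (0, 0)

-- first loop: value_to_index[value].append(index)
def pvDictA (nums : List Int) : PySem.Dict Int (List Int) :=
  (PySem.List.enumerate nums 0).foldl (fun d p =>
    let d' := if d.contains p.2 then d else d.insert p.2 []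
    d'.modify p.2 [] (· ++ [p.1])) PySem.Dict.empty

-- second loop: ans.add(pair) for every matching (index, index_diff)
def pvAnsA (nums : List Int) (k : Int) : PySem.Set (Int × Int) :=
  (PySem.List.enumerate nums 0).foldl (fun ans p =>
    let diff := if p.2 < 0 then p.2 + k else p.2 - k
    if (pvDictA nums).contains diff then
      ((pvDictA nums).getD diff []).foldl (fun ans index_diff =>
        if p.1 ≠ index_diff then ans.add (pvSpair p.1 index_diff) else ans) ans
    else ans) PySem.Set.empty

def find_price_gap_pair (nums : List Int) (k : Int) : Option (Int × Int) :=
  let ans := pvAnsA nums k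
  if ans = [] then none
  else PySem.List.pyGet? (PySem.List.sorted2 ans (fun q => q.1) (fun q => q.2) false) 0

-- ===== PORT B =====

-- target(v) = v + k if v < 0 else v - k
def fpgpTarget (k v : Int) : Int := if v < 0 then v + k else v - k

-- for i in range(n): for j in range(i+1, n): if match: return (i, j)   — early exit
def find_price_gap_pair_alt (nums : List Int) (k : Int) : Option (Int × Int) :=
  let n := nums.length
  (List.range n).findSome? (fun i =>
    let ti := nums.getD i 0
    ((List.range' (i + 1) (n - (i + 1))).find? (fun j =>
        fpgpTarget k ti == nums.getD j 0 || fpgpTarget k (nums.getD j 0) == ti)).map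
      (fun (j : Nat) => ((i : Int), (j : Int))))

-- ===== PRECONDITION & SPEC =====
def Spec_find_price_gap_pair (nums : List Int) (k : Int) (out : Option (Int × Int)) : Prop := out = find_price_gap_pair_alt nums k
instance (nums : List Int) (k : Int) (out : Option (Int × Int)) : Decidable (Spec_find_price_gap_pair nums k out) := by unfold Spec_find_price_gap_pair; infer_instance

-- ===== CLAIM (what is proved, stated in full; the proofs are below) =====
def Claim_equal_find_price_gap_pair : Prop := ∀ (nums : List Int) (k : Int), Dom_find_price_gap_pair nums k → Spec_find_price_gap_pair nums k (find_price_gap_pair nums k)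

-- ===== LEMMAS AND PROOFS =====

-- the matching condition and the set of valid pairs, stated over the input
def condP (nums : List Int) (k : Int) (a b : Nat) : Prop :=
  fpgpTarget k (nums.getD a 0) = nums.getD b 0 ∨ fpgpTarget k (nums.getD b 0) = nums.getD a 0

def isPair (nums : List Int) (k : Int) (p : Int × Int) : Prop :=
  ∃ a b : Nat, a < b ∧ b < nums.length ∧ condP nums k a b ∧ p = ((a : Int), (b : Int))

-- lexicographic order on index pairs (Python tuple comparison)
def lexLe (p q : Int × Int) : Prop := p.1 < q.1 ∨ (p.1 = q.1 ∧ p.2 ≤ q.2)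

theorem spair_eq (x y : Int) : pvSpair x y = if y < x then (y, x) else (x, y) := by
  unfold pvSpair
  simp [PySem.List.sorted, PySem.List.insertBy]
  split_ifs <;> simp

theorem dict_getD (l : List (Int × Int)) (d : PySem.Dict Int (List Int)) (v : Int) :
    (l.foldl (fun d p =>
        let d' := if d.contains p.2 then d else d.insert p.2 []
        d'.modify p.2 [] (· ++ [p.1])) d).getD v []
      = d.getD v [] ++ (l.filter (fun p => p.2 == v)).map (·.1) := by
  induction l generalizing d with
  | nil => simp
  | cons p t ih =>
    simp only [List.foldl_cons, ih, List.filter_cons]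
    by_cases hc : d.contains p.2
    · simp only [hc, if_true]
      rw [PySem.Dict.getD_modify]
      by_cases hv : v = p.2
      · subst hv; simp
      · simp [hv, Ne.symm hv]
    · simp only [hc, if_false, Bool.false_eq_true]
      rw [PySem.Dict.getD_modify]
      by_cases hv : v = p.2
      · subst hv
        rw [PySem.Dict.getD_insert, PySem.Dict.getD_of_not_contains d [] (by simpa using hc)]
        simp
      · simp [PySem.Dict.getD_insert, hv, Ne.symm hv]

theorem pvDictA_getD (nums : List Int) (v : Int) :
    (pvDictA nums).getD v [] = ((PySem.List.enumerate nums 0).filter (fun p => p.2 == v)).map (·.1) := by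
  unfold pvDictA
  rw [dict_getD]
  simp [PySem.Dict.getD_empty]

theorem mem_pvDictA (nums : List Int) (v i : Int) :
    i ∈ (pvDictA nums).getD v [] ↔ ∃ a : Nat, a < nums.length ∧ nums.getD a 0 = v ∧ i = (a : Int) := by
  rw [pvDictA_getD]
  simp only [List.mem_map, List.mem_filter, PySem.List.mem_enumerate_iff]
  constructor
  · rintro ⟨p, ⟨⟨a, ha, rfl⟩, hv⟩, rfl⟩
    simp only [beq_iff_eq] at hv
    exact ⟨a, ha, by rw [List.getD_eq_getElem _ _ ha]; exact hv, by simp⟩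
  · rintro ⟨a, ha, hv, rfl⟩
    refine ⟨((a : Int), nums[a]), ⟨⟨a, ha, by simp⟩, ?_⟩, rfl⟩
    simp only [beq_iff_eq]
    rw [← List.getD_eq_getElem nums 0 ha]; exact hv

theorem mem_inner (i : Int) (L : List Int) (acc : PySem.Set (Int × Int)) (y : Int × Int) :
    y ∈ L.foldl (fun ans idx => if i ≠ idx then ans.add (pvSpair i idx) else ans) acc ↔
      y ∈ acc ∨ ∃ idx ∈ L, i ≠ idx ∧ y = pvSpair i idx := by
  induction L generalizing acc with
  | nil => simp
  | cons c t ih =>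
    simp only [List.foldl_cons]
    by_cases hc : i = c
    · rw [if_neg (by simpa using hc), ih]
      constructor
      · rintro (h | ⟨idx, hm, hne, rfl⟩)
        · exact Or.inl h
        · exact Or.inr ⟨idx, List.mem_cons_of_mem _ hm, hne, rfl⟩
      · rintro (h | ⟨idx, hm, hne, rfl⟩)
        · exact Or.inl h
        · rcases List.mem_cons.mp hm with rfl | hm'
          · exact absurd hc hne
          · exact Or.inr ⟨idx, hm', hne, rfl⟩
    · rw [if_pos (by simpa using hc), ih]
      simp only [PySem.Set.mem_add]
      constructor
      · rintro ((h | rfl) | ⟨idx, hm, hne, rfl⟩)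
        · exact Or.inl h
        · exact Or.inr ⟨c, List.mem_cons_self, hc, rfl⟩
        · exact Or.inr ⟨idx, List.mem_cons_of_mem _ hm, hne, rfl⟩
      · rintro (h | ⟨idx, hm, hne, rfl⟩)
        · exact Or.inl (Or.inl h)
        · rcases List.mem_cons.mp hm with rfl | hm'
          · exact Or.inl (Or.inr rfl)
          · exact Or.inr ⟨idx, hm', hne, rfl⟩

theorem mem_pvAnsA (nums : List Int) (k : Int) (y : Int × Int) :
    y ∈ pvAnsA nums k ↔ isPair nums k y := by
  have outer : ∀ (E : List (Int × Int)) (acc : PySem.Set (Int × Int)),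
      y ∈ E.foldl (fun ans p =>
          let diff := if p.2 < 0 then p.2 + k else p.2 - k
          if (pvDictA nums).contains diff then
            ((pvDictA nums).getD diff []).foldl (fun ans index_diff =>
              if p.1 ≠ index_diff then ans.add (pvSpair p.1 index_diff) else ans) ans
          else ans) acc ↔
        y ∈ acc ∨ ∃ p ∈ E, ∃ idx ∈ (pvDictA nums).getD (if p.2 < 0 then p.2 + k else p.2 - k) [],
          p.1 ≠ idx ∧ y = pvSpair p.1 idx := by
    intro E
    induction E with
    | nil => simp
    | cons q t ih =>
      intro acc
      simp only [List.foldl_cons]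
      have step : (let diff := if q.2 < 0 then q.2 + k else q.2 - k
          if (pvDictA nums).contains diff then
            ((pvDictA nums).getD diff []).foldl (fun ans index_diff =>
              if q.1 ≠ index_diff then ans.add (pvSpair q.1 index_diff) else ans) acc
          else acc)
          = ((pvDictA nums).getD (if q.2 < 0 then q.2 + k else q.2 - k) []).foldl
              (fun ans index_diff =>
                if q.1 ≠ index_diff then ans.add (pvSpair q.1 index_diff) else ans) acc := by
        by_cases hc : (pvDictA nums).contains (if q.2 < 0 then q.2 + k else q.2 - k)
        · simp [hc]
        · rw [PySem.Dict.getD_of_not_contains _ _ (by simpa using hc)]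
          simp [hc]
      rw [step, ih, mem_inner]
      constructor
      · rintro ((h | ⟨idx, hm, hne, rfl⟩) | ⟨p, hp, rest⟩)
        · exact Or.inl h
        · exact Or.inr ⟨q, List.mem_cons_self, idx, hm, hne, rfl⟩
        · exact Or.inr ⟨p, List.mem_cons_of_mem _ hp, rest⟩
      · rintro (h | ⟨p, hp, rest⟩)
        · exact Or.inl (Or.inl h)
        · rcases List.mem_cons.mp hp with rfl | hp'
          · obtain ⟨idx, hm, hne, rfl⟩ := rest
            exact Or.inl (Or.inr ⟨idx, hm, hne, rfl⟩)
          · exact Or.inr ⟨p, hp', rest⟩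
  unfold pvAnsA
  rw [outer]
  simp only [PySem.Set.empty, List.not_mem_nil, false_or, PySem.List.mem_enumerate_iff]
  constructor
  · rintro ⟨p, ⟨a, ha, rfl⟩, idx, hidx, hne, rfl⟩
    dsimp only at hidx hne ⊢
    simp only [zero_add] at hidx hne ⊢
    rw [mem_pvDictA] at hidx
    obtain ⟨b, hb, hbv, rfl⟩ := hidx
    have hab : a ≠ b := by intro h; exact hne (by rw [h])
    have hga : nums.getD a 0 = nums[a] := List.getD_eq_getElem _ _ ha
    have htgt : nums.getD b 0 = fpgpTarget k (nums.getD a 0) := by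
      unfold fpgpTarget; rw [hga]; exact hbv
    rcases Nat.lt_or_ge a b with h | h
    · refine ⟨a, b, h, hb, Or.inl htgt.symm, ?_⟩
      rw [spair_eq, if_neg (by omega)]
    · have h' : b < a := by omega
      refine ⟨b, a, h', ha, Or.inr htgt.symm, ?_⟩
      rw [spair_eq, if_pos (by omega)]
  · rintro ⟨a, b, hab, hb, hcond, rfl⟩
    have ha : a < nums.length := lt_trans hab hb
    have hga : nums.getD a 0 = nums[a] := List.getD_eq_getElem _ _ ha
    have hgb : nums.getD b 0 = nums[b] := List.getD_eq_getElem _ _ hb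
    rcases hcond with h | h
    · refine ⟨((a : Int), nums[a]), ⟨a, ha, by simp⟩, (b : Int), ?_, ?_, ?_⟩
      · rw [mem_pvDictA]
        exact ⟨b, hb, by dsimp only; rw [← h]; unfold fpgpTarget; rw [hga], rfl⟩
      · show (a : Int) ≠ (b : Int); omega
      · dsimp only
        rw [spair_eq, if_neg (by omega)]
    · refine ⟨((b : Int), nums[b]), ⟨b, hb, by simp⟩, (a : Int), ?_, ?_, ?_⟩
      · rw [mem_pvDictA]
        exact ⟨a, ha, by dsimp only; rw [← h]; unfold fpgpTarget; rw [hgb], rfl⟩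
      · show (b : Int) ≠ (a : Int); omega
      · dsimp only
        rw [spair_eq, if_pos (by omega)]

-- ==== sorted2 head is a lex-minimum ====
def pvBfr (p q : Int × Int) : Bool :=
  decide (p.1 < q.1) || (!decide (q.1 < p.1) && decide (p.2 < q.2))

theorem pvBfr_false (p q : Int × Int) (h : pvBfr p q = false) : lexLe q p := by
  simp [pvBfr] at h; unfold lexLe; omega

theorem pvBfr_true (p q : Int × Int) (h : pvBfr p q = true) : lexLe p q := by
  simp [pvBfr] at h; unfold lexLe; omega

theorem lexLe_trans {p q r : Int × Int} (h1 : lexLe p q) (h2 : lexLe q r) : lexLe p r := by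
  unfold lexLe at *; omega

theorem insertBy_pairwise (x : Int × Int) (l : List (Int × Int)) (h : l.Pairwise lexLe) :
    (PySem.List.insertBy pvBfr x l).Pairwise lexLe := by
  induction l with
  | nil => rw [PySem.List.insertBy.eq_def]; simp
  | cons a t ih =>
    rw [PySem.List.insertBy.eq_def]
    dsimp only
    rcases List.pairwise_cons.mp h with ⟨ha, ht⟩
    by_cases hb : pvBfr x a = true
    · rw [if_pos hb]
      refine List.pairwise_cons.mpr ⟨?_, h⟩
      intro y hy
      rcases List.mem_cons.mp hy with rfl | hy'
      · exact pvBfr_true _ _ hb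
      · exact lexLe_trans (pvBfr_true _ _ hb) (ha y hy')
    · rw [if_neg hb]
      refine List.pairwise_cons.mpr ⟨?_, ih ht⟩
      intro y hy
      rcases (PySem.List.mem_insertBy pvBfr x y t).mp hy with rfl | hy'
      · exact pvBfr_false _ _ (Bool.eq_false_iff.mpr hb)
      · exact ha y hy'

theorem sorted2_pairwise (xs : List (Int × Int)) :
    (PySem.List.sorted2 xs (fun q => q.1) (fun q => q.2) false).Pairwise lexLe := by
  have heq : PySem.List.sorted2 xs (fun q => q.1) (fun q => q.2) false
      = xs.foldl (fun acc x => PySem.List.insertBy pvBfr x acc) [] := rfl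
  rw [heq]
  have aux : ∀ (ys : List (Int × Int)) (acc : List (Int × Int)), acc.Pairwise lexLe →
      (ys.foldl (fun acc x => PySem.List.insertBy pvBfr x acc) acc).Pairwise lexLe := by
    intro ys
    induction ys with
    | nil => intro acc h; simpa using h
    | cons y t ih => intro acc h; exact ih _ (insertBy_pairwise y acc h)
  exact aux xs [] (by simp)

theorem sorted2_head_min (xs : List (Int × Int)) (m : Int × Int) (t : List (Int × Int))
    (h : PySem.List.sorted2 xs (fun q => q.1) (fun q => q.2) false = m :: t) :
    m ∈ xs ∧ ∀ y ∈ xs, lexLe m y := by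
  have hperm := PySem.List.sorted2_perm xs (fun q => q.1) (fun q => q.2) false
  rw [h] at hperm
  constructor
  · exact hperm.mem_iff.mp List.mem_cons_self
  · intro y hy
    rcases List.mem_cons.mp (hperm.mem_iff.mpr hy) with rfl | hy'
    · unfold lexLe; omega
    · have hp := sorted2_pairwise xs
      rw [h] at hp
      exact (List.pairwise_cons.mp hp).1 y hy'

-- ==== characterization of B ====
theorem condB_iff (nums : List Int) (k : Int) (a b : Nat) :
    (fpgpTarget k (nums.getD a 0) == nums.getD b 0
      || fpgpTarget k (nums.getD b 0) == nums.getD a 0) = true ↔ condP nums k a b := by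
  simp [condP]

theorem mem_inner_range (i j n : Nat) (hi : i < n) :
    j ∈ List.range' (i + 1) (n - (i + 1)) ↔ i + 1 ≤ j ∧ j < n := by
  rw [List.mem_range'_1]; omega

theorem B_none_iff (nums : List Int) (k : Int) :
    find_price_gap_pair_alt nums k = none ↔ ∀ p, ¬ isPair nums k p := by
  unfold find_price_gap_pair_alt
  rw [List.findSome?_eq_none_iff]
  constructor
  · intro h p hp
    obtain ⟨a, b, hab, hb, hcond, rfl⟩ := hp
    have ha : a < nums.length := lt_trans hab hb
    have := h a (List.mem_range.mpr ha)
    rw [Option.map_eq_none_iff, List.find?_eq_none] at this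
    exact this b ((mem_inner_range a b _ ha).mpr ⟨hab, hb⟩) ((condB_iff nums k a b).mpr hcond)
  · intro h i hi
    rw [Option.map_eq_none_iff, List.find?_eq_none]
    intro j hj hpred
    have hi' := List.mem_range.mp hi
    have hj' := (mem_inner_range i j _ hi').mp hj
    exact h ((i : Int), (j : Int)) ⟨i, j, by omega, hj'.2, (condB_iff nums k i j).mp hpred, rfl⟩

theorem B_some (nums : List Int) (k : Int) (m : Int × Int)
    (h : find_price_gap_pair_alt nums k = some m) :
    isPair nums k m ∧ ∀ p, isPair nums k p → lexLe m p := by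
  unfold find_price_gap_pair_alt at h
  rw [List.findSome?_eq_some_iff] at h
  obtain ⟨l₁, i, l₂, hsplit, hinner, hprev⟩ := h
  rw [Option.map_eq_some_iff] at hinner
  obtain ⟨j, hfind, rfl⟩ := hinner
  rw [List.find?_eq_some_iff_append] at hfind
  obtain ⟨hpred, as, bs, hsplit', hprev'⟩ := hfind
  -- structure of the outer range
  have hpwr : (l₁ ++ i :: l₂).Pairwise (· < ·) := by rw [← hsplit]; exact List.pairwise_lt_range
  rw [List.pairwise_append] at hpwr
  have hl₁lt : ∀ a ∈ l₁, a < i := fun a ha => hpwr.2.2 a ha i List.mem_cons_self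
  have hl₂gt : ∀ b ∈ l₂, i < b := fun b hb => (List.pairwise_cons.mp hpwr.2.1).1 b hb
  have hi : i < nums.length := by
    have : i ∈ List.range nums.length := by rw [hsplit]; exact List.mem_append_right _ List.mem_cons_self
    exact List.mem_range.mp this
  -- structure of the inner range
  have hpwr' : (as ++ j :: bs).Pairwise (· < ·) := by
    rw [← hsplit']; exact List.pairwise_lt_range' 1
  rw [List.pairwise_append] at hpwr'
  have haslt : ∀ a ∈ as, a < j := fun a ha => hpwr'.2.2 a ha j List.mem_cons_self
  have hbsgt : ∀ b ∈ bs, j < b := fun b hb => (List.pairwise_cons.mp hpwr'.2.1).1 b hb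
  have hj : i + 1 ≤ j ∧ j < nums.length := by
    have : j ∈ List.range' (i + 1) (nums.length - (i + 1)) := by
      rw [hsplit']; exact List.mem_append_right _ List.mem_cons_self
    exact (mem_inner_range i j _ hi).mp this
  refine ⟨⟨i, j, by omega, hj.2, (condB_iff nums k i j).mp hpred, rfl⟩, ?_⟩
  rintro p ⟨a, b, hab, hb, hcond, rfl⟩
  have ha : a < nums.length := lt_trans hab hb
  -- no pair starts before i
  have hge : i ≤ a := by
    by_contra hlt
    have hmem : a ∈ l₁ := by
      have : a ∈ List.range nums.length := List.mem_range.mpr ha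
      rw [hsplit] at this
      rcases List.mem_append.mp this with h1 | h2
      · exact h1
      · rcases List.mem_cons.mp h2 with rfl | h3
        · omega
        · exact absurd (hl₂gt a h3) (by omega)
    have := hprev a hmem
    rw [Option.map_eq_none_iff, List.find?_eq_none] at this
    exact this b ((mem_inner_range a b _ ha).mpr ⟨hab, hb⟩) ((condB_iff nums k a b).mpr hcond)
  rcases Nat.eq_or_lt_of_le hge with rfl | hlt
  · -- same first index: j is the least matching second index
    have hjb : j ≤ b := by
      by_contra hgt
      have hmem : b ∈ as := by
        have : b ∈ List.range' (i + 1) (nums.length - (i + 1)) :=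
          (mem_inner_range i b _ hi).mpr ⟨by omega, hb⟩
        rw [hsplit'] at this
        rcases List.mem_append.mp this with h1 | h2
        · exact h1
        · rcases List.mem_cons.mp h2 with rfl | h3
          · omega
          · exact absurd (hbsgt b h3) (by omega)
      have hf := hprev' b hmem
      simp only [Bool.not_eq_eq_eq_not, Bool.not_true] at hf
      have h2 := (condB_iff nums k i b).mpr hcond
      rw [hf] at h2
      cases h2
    unfold lexLe; right; exact ⟨rfl, by dsimp only; exact_mod_cast hjb⟩
  · unfold lexLe; left; dsimp only; exact_mod_cast hlt

-- ===== VERDICT (by name: the statement is the Claim_ definition above) =====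
theorem find_price_gap_pair_spec : Claim_equal_find_price_gap_pair := by
  intro nums k _
  unfold Spec_find_price_gap_pair
  cases hB : find_price_gap_pair_alt nums k with
  | none =>
    have hnp := (B_none_iff nums k).mp hB
    have hnil : pvAnsA nums k = [] := by
      rw [List.eq_nil_iff_forall_not_mem]
      intro p hp
      exact hnp p ((mem_pvAnsA nums k p).mp hp)
    unfold find_price_gap_pair
    simp [hnil]
  | some m =>
    obtain ⟨hm, hmin⟩ := B_some nums k m hB
    have hmem : m ∈ pvAnsA nums k := (mem_pvAnsA nums k m).mpr hm
    have hne : pvAnsA nums k ≠ [] := by intro h; rw [h] at hmem; cases hmem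
    show (if pvAnsA nums k = [] then none
      else PySem.List.pyGet?
        (PySem.List.sorted2 (pvAnsA nums k) (fun q => q.1) (fun q => q.2) false) 0) = some m
    rw [if_neg hne]
    cases hs : PySem.List.sorted2 (pvAnsA nums k) (fun q => q.1) (fun q => q.2) false with
    | nil =>
      exfalso
      have hp := PySem.List.sorted2_perm (pvAnsA nums k) (fun q => q.1) (fun q => q.2) false
      rw [hs] at hp
      exact hne hp.symm.eq_nil
    | cons m' t =>
      obtain ⟨hm'mem, hm'min⟩ := sorted2_head_min _ m' t hs
      have hget : PySem.List.pyGet? (m' :: t) (0 : Int) = some m' := by simp [pysem]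
      rw [hget]
      have h1 := hmin m' ((mem_pvAnsA nums k m').mp hm'mem)
      have h2 := hm'min m hmem
      obtain ⟨m1, m2⟩ := m
      obtain ⟨n1, n2⟩ := m'
      unfold lexLe at h1 h2
      dsimp only at h1 h2
      have heq : n1 = m1 ∧ n2 = m2 := by
        rcases h1 with h1 | ⟨e1, l1⟩ <;> rcases h2 with h2 | ⟨e2, l2⟩ <;> exact ⟨by omega, by omega⟩
      rw [heq.1, heq.2]
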